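-- pv_equiv track=rewrite | github.com/fmaa23/sim_rl | Supporting_files/supporting_functions.py | make_unique_edge_type
-- ===== SOURCE A (Python) =====
-- def get_connection_info(adjacent_list):
--     connection_info = {}
--     for start_node in adjacent_list.keys():
--         for end_node in adjacent_list[start_node]:
--             connect_start_node_list = connection_info.setdefault(end_node, [])
--             connect_start_node_list.append(start_node)
--             connection_info[end_node] = connect_start_node_list
--
--     return connection_info
--
-- def make_unique_edge_type(adjacent_list, edge_list):
--     # dictionary where keys are node, values are the edge type
--     connection_info = get_connection_info(adjacent_list)
--     edge_type_info = {}
--     for end_node in connection_info.keys():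
--         start_node_list = connection_info[end_node]
--         edge_type_list = []
--         for start_node in start_node_list:
--             edge_type = edge_list[start_node][end_node]
--             edge_type_list.append(edge_type)
--         edge_type_info[end_node] = edge_type_list
--
--     return edge_type_info
-- ===== SOURCE B (Python) =====
-- def make_unique_edge_type(adjacent_list, edge_list):
--     edge_type_info = {}
--     for start_node in adjacent_list:
--         for end_node in adjacent_list[start_node]:
--             edge_type_info.setdefault(end_node, []).append(edge_list[start_node][end_node])
--     return edge_type_info
-- ===== Notes on version B (the rewrite author's own statement) =====
-- stated objective: simpler
-- what changed: Single fused traversal with setdefault-append replacing A's two-pass scheme (build an inverted connection_info dict, then a second loop re-looking edges up); dict insertion order makes key and per-list order coincide.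
import Mathlib
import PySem

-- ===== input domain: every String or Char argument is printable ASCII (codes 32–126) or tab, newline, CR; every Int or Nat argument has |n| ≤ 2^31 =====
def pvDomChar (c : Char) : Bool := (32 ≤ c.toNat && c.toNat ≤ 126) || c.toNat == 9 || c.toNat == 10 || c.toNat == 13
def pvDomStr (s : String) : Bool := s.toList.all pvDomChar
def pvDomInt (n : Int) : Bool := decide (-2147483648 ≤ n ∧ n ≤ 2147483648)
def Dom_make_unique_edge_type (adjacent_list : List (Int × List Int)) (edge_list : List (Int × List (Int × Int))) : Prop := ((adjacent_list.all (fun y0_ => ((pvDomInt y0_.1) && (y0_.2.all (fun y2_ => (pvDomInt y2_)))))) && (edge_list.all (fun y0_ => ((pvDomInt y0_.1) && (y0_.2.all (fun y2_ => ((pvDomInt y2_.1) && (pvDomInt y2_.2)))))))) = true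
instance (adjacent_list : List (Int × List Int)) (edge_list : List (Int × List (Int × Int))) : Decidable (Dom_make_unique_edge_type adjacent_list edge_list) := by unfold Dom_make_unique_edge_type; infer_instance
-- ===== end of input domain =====

-- B fuses A's two passes (invert adjacency into connection_info, then re-look every edge up)
-- into one traversal with setdefault-append; objective: simpler. Same return value on Pre_.

-- ===== PORT A =====
def get_connection_info (adjacent_list : List (Int × List Int)) : PySem.Dict Int (List Int) :=
  (PySem.Dict.ofList adjacent_list).items.foldl
    (fun ci p => p.2.foldl (fun ci e => ci.modify e [] (fun l => l ++ [p.1])) ci)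
    PySem.Dict.empty

def make_unique_edge_type (adjacent_list : List (Int × List Int)) (edge_list : List (Int × List (Int × Int))) : List (Int × List Int) :=
  let connection_info := get_connection_info adjacent_list
  let eld := PySem.Dict.ofList edge_list
  (connection_info.items.foldl
    (fun eti p =>
      eti.insert p.1
        (p.2.foldl (fun acc s => acc ++ [(PySem.Dict.ofList (eld.getD s [])).getD p.1 0]) []))
    PySem.Dict.empty).items

-- ===== PORT B =====
def make_unique_edge_type_alt (adjacent_list : List (Int × List Int)) (edge_list : List (Int × List (Int × Int))) : List (Int × List Int) :=
  let eld := PySem.Dict.ofList edge_list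
  ((PySem.Dict.ofList adjacent_list).items.foldl
    (fun eti p =>
      p.2.foldl
        (fun eti e => eti.modify e [] (fun l => l ++ [(PySem.Dict.ofList (eld.getD p.1 [])).getD e 0]))
        eti)
    PySem.Dict.empty).items

-- ===== PRECONDITION & SPEC =====
-- Pre_ excludes exactly the inputs where Python A raises KeyError: some edge (s, e) of the
-- adjacency dict has no entry edge_list[s] or no entry edge_list[s][e].
def Pre_make_unique_edge_type (adjacent_list : List (Int × List Int)) (edge_list : List (Int × List (Int × Int))) : Prop :=
  ∀ p ∈ (PySem.Dict.ofList adjacent_list).items, ∀ e ∈ p.2,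
    (PySem.Dict.ofList edge_list).contains p.1 = true ∧
    (PySem.Dict.ofList ((PySem.Dict.ofList edge_list).getD p.1 [])).contains e = true
instance (adjacent_list : List (Int × List Int)) (edge_list : List (Int × List (Int × Int))) : Decidable (Pre_make_unique_edge_type adjacent_list edge_list) := by unfold Pre_make_unique_edge_type; infer_instance

def pvWitness_make_unique_edge_type : (List (Int × List Int)) × (List (Int × List (Int × Int))) :=
  ([(0, [1, 2]), (2, [1])], [(0, [(1, 10), (2, 20)]), (2, [(1, 30)])])

def Spec_make_unique_edge_type (adjacent_list : List (Int × List Int)) (edge_list : List (Int × List (Int × Int))) (out : List (Int × List Int)) : Prop := out = make_unique_edge_type_alt adjacent_list edge_list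
instance (adjacent_list : List (Int × List Int)) (edge_list : List (Int × List (Int × Int))) (out : List (Int × List Int)) : Decidable (Spec_make_unique_edge_type adjacent_list edge_list out) := by unfold Spec_make_unique_edge_type; infer_instance

-- ===== CLAIM (what is proved, stated in full; the proofs are below) =====
def Claim_equal_make_unique_edge_type : Prop := ∀ (adjacent_list : List (Int × List Int)) (edge_list : List (Int × List (Int × Int))), Dom_make_unique_edge_type adjacent_list edge_list → Pre_make_unique_edge_type adjacent_list edge_list → Spec_make_unique_edge_type adjacent_list edge_list (make_unique_edge_type adjacent_list edge_list)

-- ===== LEMMAS AND PROOFS =====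

-- inner loop over an edge list flattened to a loop over (end, value) pairs
theorem pv_flat_inner (g : Int → Int → Int) (s : Int) (es : List Int) (d : PySem.Dict Int (List Int)) :
    es.foldl (fun d e => d.modify e [] (fun l => l ++ [g s e])) d
    = (es.map (fun e => (e, g s e))).foldl (fun d q => d.modify q.1 [] (fun l => l ++ [q.2])) d := by
  induction es generalizing d with
  | nil => rfl
  | cons e t ih => simp [ih]

theorem pv_flatten (g : Int → Int → Int) (l : List (Int × List Int)) (d : PySem.Dict Int (List Int)) :
    l.foldl (fun d p => p.2.foldl (fun d e => d.modify e [] (fun l => l ++ [g p.1 e])) d) d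
    = (l.flatMap (fun p => p.2.map (fun e => (e, g p.1 e)))).foldl
        (fun d q => d.modify q.1 [] (fun l => l ++ [q.2])) d := by
  induction l generalizing d with
  | nil => rfl
  | cons p t ih =>
    rw [List.flatMap_cons, List.foldl_append, List.foldl_cons, pv_flat_inner, ih]

theorem pv_filter_map_key (f : Int → Int → Int) (pairs : List (Int × Int)) (c : Int) :
    (((pairs.map (fun q => (q.1, f q.2 q.1))).filter (fun q => q.1 == c)).map (fun q => q.2))
    = (((pairs.filter (fun q => q.1 == c)).map (fun q => q.2)).map (fun s => f s c)) := by
  induction pairs with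
  | nil => rfl
  | cons q t ih =>
    by_cases h : q.1 = c
    · simp [h, ih]
    · simp [h, ih]

theorem pv_foldl_append_map (f : Int → Int) (l : List Int) (acc : List Int) :
    l.foldl (fun acc s => acc ++ [f s]) acc = acc ++ l.map f := by
  induction l generalizing acc with
  | nil => simp
  | cons s t ih => simp [ih]

-- the grouped dict built from value-mapped pairs has the value-mapped items
theorem pv_D_items (f : Int → Int → Int) (pairs : List (Int × Int)) :
    ((pairs.map (fun q => (q.1, f q.2 q.1))).foldl
        (fun d q => d.modify q.1 [] (fun l => l ++ [q.2])) PySem.Dict.empty).items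
    = ((pairs.foldl (fun d q => d.modify q.1 [] (fun l => l ++ [q.2])) PySem.Dict.empty).items).map
        (fun p => (p.1, p.2.map (fun s => f s p.1))) := by
  set D1 := pairs.foldl (fun d q => d.modify q.1 [] (fun l => l ++ [q.2])) PySem.Dict.empty with hD1
  set D2 := (pairs.map (fun q => (q.1, f q.2 q.1))).foldl
      (fun d q => d.modify q.1 [] (fun l => l ++ [q.2])) PySem.Dict.empty with hD2
  have hk1 : D1.keys.Nodup := by
    rw [hD1]
    exact PySem.Dict.nodup_keys_foldl_modify_key pairs (fun q : Int × Int => q.1) []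
      (fun _ q v => v ++ [q.2]) PySem.Dict.empty PySem.Dict.nodup_keys_empty
  have hk2 : D2.keys.Nodup := by
    rw [hD2]
    exact PySem.Dict.nodup_keys_foldl_modify_key _ (fun q : Int × Int => q.1) []
      (fun _ q v => v ++ [q.2]) PySem.Dict.empty PySem.Dict.nodup_keys_empty
  have e1 : D1.keys = PySem.Set.update (PySem.Dict.empty : PySem.Dict Int (List Int)).keys
      (pairs.map (fun q : Int × Int => q.1)) := by
    rw [hD1]
    exact PySem.Dict.keys_foldl_modify_key pairs (fun q : Int × Int => q.1) []
      (fun _ q v => v ++ [q.2]) PySem.Dict.empty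
  have e2 : D2.keys = PySem.Set.update (PySem.Dict.empty : PySem.Dict Int (List Int)).keys
      ((pairs.map (fun q => (q.1, f q.2 q.1))).map (fun q : Int × Int => q.1)) := by
    rw [hD2]
    exact PySem.Dict.keys_foldl_modify_key _ (fun q : Int × Int => q.1) []
      (fun _ q v => v ++ [q.2]) PySem.Dict.empty
  have hkeys : D2.keys = D1.keys := by
    rw [e1, e2, List.map_map]
    rfl
  have hget : ∀ c, D2.getD c [] = (D1.getD c []).map (fun s => f s c) := by
    intro c
    rw [hD1, hD2, PySem.Dict.getD_foldl_modify_append, PySem.Dict.getD_foldl_modify_append]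
    simpa using pv_filter_map_key f pairs c
  rw [PySem.Dict.items_eq_map_keys D2 hk2 [], PySem.Dict.items_eq_map_keys D1 hk1 [], hkeys,
    List.map_map]
  exact List.map_congr_left (fun k _ => by simp [Function.comp, hget k])

-- full chain for an abstract edge-type lookup f: A's two passes equal B's fused pass
theorem pv_main (f : Int → Int → Int) (l : List (Int × List Int)) :
    ((l.foldl (fun ci p => p.2.foldl (fun ci e => ci.modify e [] (fun v => v ++ [p.1])) ci)
        PySem.Dict.empty).items.foldl
      (fun eti p => eti.insert p.1 (p.2.foldl (fun acc s => acc ++ [f s p.1]) []))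
      PySem.Dict.empty).items
    = (l.foldl (fun eti p =>
          p.2.foldl (fun eti e => eti.modify e [] (fun v => v ++ [f p.1 e])) eti)
        PySem.Dict.empty).items := by
  rw [pv_flatten (fun s _ => s) l PySem.Dict.empty, pv_flatten f l PySem.Dict.empty]
  have hpairs : l.flatMap (fun p => p.2.map (fun e => (e, f p.1 e)))
      = (l.flatMap (fun p => p.2.map (fun e => (e, p.1)))).map (fun q => (q.1, f q.2 q.1)) := by
    simp only [List.map_flatMap, List.map_map, Function.comp_def]
  rw [hpairs, pv_D_items f (l.flatMap (fun p => p.2.map (fun e => (e, p.1))))]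
  set D1 := (l.flatMap (fun p => p.2.map (fun e => (e, p.1)))).foldl
      (fun d q => d.modify q.1 [] (fun v => v ++ [q.2])) PySem.Dict.empty with hD1
  have hk1 : D1.keys.Nodup := by
    rw [hD1]
    exact PySem.Dict.nodup_keys_foldl_modify_key _ (fun q : Int × Int => q.1) []
      (fun _ q v => v ++ [q.2]) PySem.Dict.empty PySem.Dict.nodup_keys_empty
  have hins := PySem.Dict.items_foldl_insert_fresh
    (d := (PySem.Dict.empty : PySem.Dict Int (List Int)))
    (l := D1.items) (k := fun p => p.1)
    (v := fun p => p.2.foldl (fun acc s => acc ++ [f s p.1]) [])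
    (by intro a _; simp [PySem.Dict.contains_empty]) (by simpa using hk1)
  rw [hins]
  simp only [pv_foldl_append_map]
  simp [PySem.Dict.empty]

-- ===== VERDICT (by name: the statement is the Claim_ definition above) =====
theorem make_unique_edge_type_spec : Claim_equal_make_unique_edge_type := by
  intro adjacent_list edge_list _ _
  unfold Spec_make_unique_edge_type make_unique_edge_type make_unique_edge_type_alt
    get_connection_info
  exact pv_main
    (fun s e => (PySem.Dict.ofList ((PySem.Dict.ofList edge_list).getD s [])).getD e 0)
    (PySem.Dict.ofList adjacent_list).items
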